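-- pv_equiv track=rewrite | github.com/WildMeOrg/wbia-utool | utool/util_list.py | flag_unique_items
-- ===== SOURCE A (Python) =====
-- def flag_unique_items(list_):
--     """
--     Returns a list of flags corresponding to the first time an item is seen
--
--     Args:
--         list_ (list): list of items
--
--     Returns:
--         flag_list
--     """
--     seen = set()
--     def unseen(item):
--         if item in seen:
--             return False
--         seen.add(item)
--         return True
--     flag_list = [unseen(item) for item in list_]
--     return flag_list
-- ===== SOURCE B (Python) =====
-- def flag_unique_items(list_):
--     """
--     Returns a list of flags corresponding to the first time an item is seen
--
--     Args:
--         list_ (list): list of items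
--
--     Returns:
--         flag_list
--     """
--     first = {}
--     for i, item in enumerate(list_):
--         if item not in first:
--             first[item] = i
--     return [first[item] == i for i, item in enumerate(list_)]
-- ===== Notes on version B (the rewrite author's own statement) =====
-- stated objective: alternative
-- what changed: Replaces the incremental seen-set comprehension with two passes: first build a dict mapping each item to its smallest index, then flag each position by comparing it with that recorded first index.
import Mathlib
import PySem

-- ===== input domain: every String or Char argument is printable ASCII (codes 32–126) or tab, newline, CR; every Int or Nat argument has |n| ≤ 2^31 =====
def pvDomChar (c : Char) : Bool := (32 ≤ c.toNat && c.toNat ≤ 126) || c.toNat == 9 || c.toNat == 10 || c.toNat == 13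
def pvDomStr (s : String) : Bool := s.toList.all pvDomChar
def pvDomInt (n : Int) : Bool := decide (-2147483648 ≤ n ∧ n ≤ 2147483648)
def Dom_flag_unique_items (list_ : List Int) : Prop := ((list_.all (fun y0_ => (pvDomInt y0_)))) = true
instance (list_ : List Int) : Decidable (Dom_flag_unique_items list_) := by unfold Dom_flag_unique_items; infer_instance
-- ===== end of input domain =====

-- B replaces A's incremental seen-set with a precomputed first-occurrence index table plus a comparison pass (alternative decomposition, same cost).

-- ===== PORT A =====
-- seen = set(); flag = item not in seen (adding it when unseen); flags accumulated in order.
def flag_unique_items (list_ : List Int) : List Bool :=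
  (list_.foldl
    (fun (st : PySem.Set Int × List Bool) item =>
      if PySem.Set.contains st.1 item then (st.1, st.2 ++ [false])
      else (PySem.Set.add st.1 item, st.2 ++ [true]))
    (PySem.Set.empty, [])).2

-- ===== PORT B =====
-- first = dict of smallest index per item; result[i] = (first[item] == i).
-- `first[item]` can never raise KeyError (every item was inserted in the first pass),
-- so it is rendered exactly by comparing get? with `some i`.
def flag_unique_items_alt (list_ : List Int) : List Bool :=
  let first : PySem.Dict Int Int :=
    (PySem.List.enumerate list_).foldl
      (fun d p => if d.contains p.2 then d else d.insert p.2 p.1)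
      PySem.Dict.empty
  (PySem.List.enumerate list_).map (fun p => first.get? p.2 == some p.1)

-- ===== PRECONDITION & SPEC =====
def Spec_flag_unique_items (list_ : List Int) (out : List Bool) : Prop := out = flag_unique_items_alt list_
instance (list_ : List Int) (out : List Bool) : Decidable (Spec_flag_unique_items list_ out) := by unfold Spec_flag_unique_items; infer_instance

-- ===== CLAIM (what is proved, stated in full; the proofs are below) =====
def Claim_equal_flag_unique_items : Prop := ∀ (list_ : List Int), Dom_flag_unique_items list_ → Spec_flag_unique_items list_ (flag_unique_items list_)

-- ===== LEMMAS AND PROOFS =====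

-- first index of x in the list, counting from s; none if absent
def fIdx : List Int → Int → Int → Option Int
  | [], _, _ => none
  | y :: r, x, s => if x = y then some s else fIdx r x (s + 1)

-- the common reference computation: flags of the suffix given the already-seen prefix p
def specGo (p : List Int) : List Int → List Bool
  | [] => []
  | x :: r => (!(decide (x ∈ p))) :: specGo (p ++ [x]) r

-- A-side: residual of the fold as a structural recursion on the list
def goSet (seen : PySem.Set Int) : List Int → List Bool
  | [] => []
  | x :: r => (!(decide (x ∈ seen))) :: goSet (PySem.Set.add seen x) r

lemma A_fold (xs : List Int) : ∀ (seen : PySem.Set Int) (acc : List Bool),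
    (xs.foldl
      (fun (st : PySem.Set Int × List Bool) item =>
        if PySem.Set.contains st.1 item then (st.1, st.2 ++ [false])
        else (PySem.Set.add st.1 item, st.2 ++ [true]))
      (seen, acc)).2 = acc ++ goSet seen xs := by
  induction xs with
  | nil => intro seen acc; simp [goSet]
  | cons x r ih =>
    intro seen acc
    rw [List.foldl_cons]
    by_cases h : x ∈ seen
    · have hb : PySem.Set.contains seen x = true := by simpa using h
      rw [if_pos hb, ih]
      simp [goSet, h]
    · have hb : ¬ PySem.Set.contains seen x = true := by simpa using h
      rw [if_neg hb, ih]
      simp [goSet, h]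

lemma ofList_append_singleton (p : List Int) (x : Int) :
    PySem.Set.ofList (p ++ [x]) = PySem.Set.add (PySem.Set.ofList p) x := by
  simp [PySem.Set.ofList_eq_foldl, List.foldl_append]

lemma goSet_ofList (xs : List Int) : ∀ p : List Int,
    goSet (PySem.Set.ofList p) xs = specGo p xs := by
  induction xs with
  | nil => intro p; simp [goSet, specGo]
  | cons x r ih =>
    intro p
    simp [goSet, specGo, PySem.Set.mem_ofList, ← ofList_append_singleton, ih]

lemma fIdx_lt (p : List Int) : ∀ (x s j : Int), fIdx p x s = some j → s ≤ j ∧ j < s + p.length := by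
  induction p with
  | nil => intro x s j h; simp [fIdx] at h
  | cons y r ih =>
    intro x s j h
    simp only [fIdx] at h
    split at h
    · simp at h
      simp only [List.length_cons]
      push_cast
      omega
    · have := ih x (s + 1) j h
      simp only [List.length_cons] at this ⊢
      push_cast at this ⊢
      omega

lemma fIdx_append_of_mem (p : List Int) : ∀ (q : List Int) (x s : Int), x ∈ p →
    fIdx (p ++ q) x s = fIdx p x s := by
  induction p with
  | nil => intro q x s h; simp at h
  | cons y r ih =>
    intro q x s h
    by_cases hxy : x = y
    · simp [fIdx, hxy]
    · have : x ∈ r := by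
        rcases List.mem_cons.mp h with h1 | h1
        · exact absurd h1 hxy
        · exact h1
      simp [fIdx, hxy, ih q x (s + 1) this]

lemma fIdx_append_of_not_mem (p : List Int) : ∀ (q : List Int) (x s : Int), x ∉ p →
    fIdx (p ++ q) x s = fIdx q x (s + p.length) := by
  induction p with
  | nil => intro q x s _; simp
  | cons y r ih =>
    intro q x s h
    have hxy : x ≠ y := fun hh => h (by simp [hh])
    have hxr : x ∉ r := fun hh => h (by simp [hh])
    simp only [List.cons_append, fIdx, if_neg hxy, ih q x (s + 1) hxr, List.length_cons]
    congr 1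
    push_cast
    ring

lemma fIdx_isSome_of_mem (p : List Int) : ∀ (x s : Int), x ∈ p → (fIdx p x s).isSome := by
  induction p with
  | nil => intro x s h; simp at h
  | cons y r ih =>
    intro x s h
    by_cases hxy : x = y
    · simp [fIdx, hxy]
    · have : x ∈ r := by
        rcases List.mem_cons.mp h with h1 | h1
        · exact absurd h1 hxy
        · exact h1
      simp [fIdx, hxy, ih x (s + 1) this]

lemma B_go (suf : List Int) : ∀ p : List Int,
    (PySem.List.enumerate suf (p.length : Int)).map
      (fun q => fIdx (p ++ suf) q.2 0 == some q.1) = specGo p suf := by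
  induction suf with
  | nil => intro p; simp [PySem.List.enumerate_nil, specGo]
  | cons x r ih =>
    intro p
    rw [PySem.List.enumerate_cons, List.map_cons, specGo]
    congr 1
    · -- head flag
      by_cases hx : x ∈ p
      · obtain ⟨j, hj⟩ := Option.isSome_iff_exists.mp (fIdx_isSome_of_mem p x 0 hx)
        have hb := fIdx_lt p x 0 j hj
        have hfi : fIdx (p ++ x :: r) x 0 = some j := by
          rw [fIdx_append_of_mem p (x :: r) x 0 hx]; exact hj
        have hne : j ≠ (p.length : Int) := by omega
        simp [hfi, hx, hne]
      · have hfi : fIdx (p ++ x :: r) x 0 = some (p.length : Int) := by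
          rw [fIdx_append_of_not_mem p (x :: r) x 0 hx]
          simp [fIdx]
        simp [hfi, hx]
    · -- tail
      have := ih (p ++ [x])
      simpa [List.append_assoc] using this

lemma dict_build_get? (xs : List Int) : ∀ (s : Int) (d : PySem.Dict Int Int) (x : Int),
    ((PySem.List.enumerate xs s).foldl
        (fun d p => if d.contains p.2 then d else d.insert p.2 p.1) d).get? x
      = if d.contains x then d.get? x else fIdx xs x s := by
  induction xs with
  | nil =>
    intro s d x
    rw [PySem.List.enumerate_nil]
    simp only [List.foldl_nil, fIdx]
    by_cases hx : d.contains x = true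
    · simp [hx]
    · simp [hx, PySem.Dict.get?_eq_none_iff_contains]
  | cons y r ih =>
    intro s d x
    rw [PySem.List.enumerate_cons, List.foldl_cons]
    by_cases hy : d.contains y = true
    · rw [if_pos hy, ih (s + 1) d x]
      by_cases hx : d.contains x = true
      · simp [hx]
      · have hxy : x ≠ y := fun h => by rw [h] at hx; exact hx hy
        simp [hx, fIdx, hxy]
    · rw [if_neg hy, ih (s + 1) (d.insert y s) x]
      by_cases hxy : x = y
      · subst hxy
        have hx' : d.contains x = false := by simpa using hy
        simp [PySem.Dict.contains_insert_self, PySem.Dict.get?_insert_self, fIdx, hx']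
      · have hc : (d.insert y s).contains x = d.contains x := by
          simp [PySem.Dict.contains_insert, hxy]
        rw [hc]
        by_cases hx : d.contains x = true
        · simp [hx, PySem.Dict.get?_insert, hxy]
        · simp [hx, fIdx, hxy]

lemma B_eq_spec (xs : List Int) : flag_unique_items_alt xs = specGo [] xs := by
  unfold flag_unique_items_alt
  have hmap : ∀ q : Int × Int, q ∈ PySem.List.enumerate xs 0 →
      (((PySem.List.enumerate xs 0).foldl
          (fun d p => if d.contains p.2 then d else d.insert p.2 p.1)
          PySem.Dict.empty).get? q.2 == some q.1)
        = (fIdx xs q.2 0 == some q.1) := by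
    intro q _
    rw [dict_build_get? xs 0 PySem.Dict.empty q.2]
    simp [PySem.Dict.contains_empty]
  calc (PySem.List.enumerate xs 0).map (fun q =>
          ((PySem.List.enumerate xs 0).foldl
            (fun d p => if d.contains p.2 then d else d.insert p.2 p.1)
            PySem.Dict.empty).get? q.2 == some q.1)
      = (PySem.List.enumerate xs 0).map (fun q => fIdx xs q.2 0 == some q.1) :=
        List.map_congr_left hmap
    _ = specGo [] xs := by
        have := B_go xs []
        simpa using this

lemma A_eq_spec (xs : List Int) : flag_unique_items xs = specGo [] xs := by
  unfold flag_unique_items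
  rw [A_fold xs PySem.Set.empty []]
  have : PySem.Set.empty = PySem.Set.ofList ([] : List Int) := rfl
  rw [this, goSet_ofList]
  simp

-- ===== VERDICT (by name: the statement is the Claim_ definition above) =====
theorem flag_unique_items_spec : Claim_equal_flag_unique_items := by
  intro xs _
  unfold Spec_flag_unique_items
  rw [A_eq_spec, B_eq_spec]
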